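-- pv_equiv track=rewrite | github.com/renos/flow-rl | flowrl/skill_depenency_resolver_new.py | _collect_skill_and_dependencies
-- ===== SOURCE A (Python) =====
-- def _collect_skill_and_dependencies(skill_name, skill_pos, order, skill_dependencies, required_floor):
--     """
--     Collect a skill and all its dependencies that need to be moved together.
--     Returns list of (skill_name, position) tuples in dependency order (dependencies first).
--     """
--     skills_to_move = []
--     visited = set()
--
--     def collect_recursive(s_name, s_pos):
--         if s_name in visited:
--             return
--         visited.add(s_name)
--
--         # Get dependencies for this skill
--         deps = skill_dependencies.get(s_name, [])
--
--         # Recursively collect dependencies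
--         for dep in deps:
--             # Find position of this dependency in order
--             # Search backwards from current position to find the closest dependency instance
--             dep_pos = None
--             for idx in range(s_pos - 1, -1, -1):
--                 name, _ = order[idx]
--                 if name == dep:
--                     dep_pos = idx
--                     break
--
--             if dep_pos is not None and dep_pos > s_pos:
--                 # This dependency is after the current skill, which shouldn't happen
--                 # but we'll skip moving it
--                 continue
--             elif dep_pos is not None:
--                 collect_recursive(dep, dep_pos)
--
--         # Add this skill to the list
--         skills_to_move.append((s_name, s_pos))
--
--     collect_recursive(skill_name, skill_pos)
--     return skills_to_move
-- ===== SOURCE B (Python) =====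
-- def _collect_skill_and_dependencies(skill_name, skill_pos, order, skill_dependencies, required_floor):
--     # Index every name's occurrence positions once, then binary-search the
--     # closest preceding occurrence instead of scanning the order backwards.
--     index = {}
--     for i, (name, _) in enumerate(order):
--         index.setdefault(name, []).append(i)  # ascending by construction
--
--     def closest_before(name, pos):
--         # largest occurrence index of `name` strictly below `pos` (bisect_left)
--         xs = index.get(name, [])
--         lo, hi = 0, len(xs)
--         while lo < hi:
--             mid = (lo + hi) // 2
--             if xs[mid] < pos:
--                 lo = mid + 1
--             else:
--                 hi = mid
--         return xs[lo - 1] if lo > 0 else None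
--
--     visited = set()
--
--     def collect(name, pos):
--         if name in visited:
--             return []
--         visited.add(name)
--         out = []
--         for dep in skill_dependencies.get(name, []):
--             dep_pos = closest_before(dep, pos)
--             if dep_pos is not None:
--                 out.extend(collect(dep, dep_pos))
--         out.append((name, pos))
--         return out
--
--     return collect(skill_name, skill_pos)
-- ===== Notes on version B (the rewrite author's own statement) =====
-- stated objective: alternative
-- what changed: Replaces A's per-dependency backward scan over the order list with a name->positions index built once, queried by binary search (bisect_left) for the closest preceding occurrence; the DFS returns its segment instead of appending to a shared accumulator.
import Mathlib
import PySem

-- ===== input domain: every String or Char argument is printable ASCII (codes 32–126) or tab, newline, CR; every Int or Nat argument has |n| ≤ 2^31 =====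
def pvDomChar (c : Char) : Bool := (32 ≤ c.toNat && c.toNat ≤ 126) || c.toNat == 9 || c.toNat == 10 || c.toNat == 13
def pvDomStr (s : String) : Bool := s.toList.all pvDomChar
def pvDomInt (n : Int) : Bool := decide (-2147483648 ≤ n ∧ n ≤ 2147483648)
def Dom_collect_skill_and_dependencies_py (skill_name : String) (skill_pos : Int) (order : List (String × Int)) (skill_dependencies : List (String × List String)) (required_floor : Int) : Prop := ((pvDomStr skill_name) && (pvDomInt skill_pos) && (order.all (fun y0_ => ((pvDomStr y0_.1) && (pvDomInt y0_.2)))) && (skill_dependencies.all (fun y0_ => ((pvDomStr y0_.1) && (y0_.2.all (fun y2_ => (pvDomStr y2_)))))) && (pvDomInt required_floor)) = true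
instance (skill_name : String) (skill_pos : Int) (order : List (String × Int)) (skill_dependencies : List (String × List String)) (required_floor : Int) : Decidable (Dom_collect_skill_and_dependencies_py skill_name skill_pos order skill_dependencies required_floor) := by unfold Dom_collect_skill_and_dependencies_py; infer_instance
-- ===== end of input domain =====

-- ===== PORT A =====
-- B replaces A's per-dependency backward scan of `order` with a one-time name→positions
-- index queried by binary search (bisect_left); same return value, proved below.

-- shared helper: Python's `skill_dependencies.get(name, [])` (the dict built from the assoc list)
def pvDeps (sd : List (String × List String)) (name : String) : List String :=
  (PySem.Dict.ofList sd).getD name []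

-- A's inner loop `for idx in range(s_pos - 1, -1, -1): ...` — backward scan from index n down to 0
def pvFindBack (order : List (String × Int)) (dep : String) : Nat → Option Int
  | 0 =>
    match PySem.List.pyGet? order ((0 : Nat) : Int) with
    | some (name, _) => if name = dep then some ((0 : Nat) : Int) else none
    | none => none
  | n + 1 =>
    match PySem.List.pyGet? order ((n + 1 : Nat) : Int) with
    | some (name, _) => if name = dep then some ((n + 1 : Nat) : Int) else pvFindBack order dep n
    | none => none

-- A's `collect_recursive`, threading (visited, skills_to_move); fuel is only a totality guard
def pvCollectA (order : List (String × Int)) (sd : List (String × List String)) :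
    Nat → String → Int → PySem.Set String → List (String × Int) →
    PySem.Set String × List (String × Int)
  | 0, _, _, vis, acc => (vis, acc)
  | fuel + 1, sName, sPos, vis, acc =>
    if PySem.Set.contains vis sName then (vis, acc)
    else
      let vis1 := PySem.Set.add vis sName
      let st := (pvDeps sd sName).foldl
        (fun (st : PySem.Set String × List (String × Int)) dep =>
          -- range(s_pos-1,-1,-1) is empty when s_pos ≤ 0
          let depPos : Option Int :=
            if sPos ≤ 0 then none else pvFindBack order dep (sPos - 1).toNat
          match depPos with
          | none => st
          | some dp =>
            if dp > sPos then st
            else pvCollectA order sd fuel dep dp st.1 st.2) (vis1, acc)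
      (st.1, st.2 ++ [(sName, sPos)])

def pvFuel (sd : List (String × List String)) : Nat :=
  sd.foldl (fun n p => n + p.2.length) 0 + 1

def collect_skill_and_dependencies_py (skill_name : String) (skill_pos : Int) (order : List (String × Int)) (skill_dependencies : List (String × List String)) (required_floor : Int) : List (String × Int) :=
  (pvCollectA order skill_dependencies (pvFuel skill_dependencies) skill_name skill_pos
    PySem.Set.empty []).2

-- ===== PORT B =====
-- `index = {}; for i, (name, _) in enumerate(order): index.setdefault(name, []).append(i)`
def pvIndex (order : List (String × Int)) : PySem.Dict String (List Int) :=
  (PySem.List.enumerate order 0).foldl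
    (fun d p => d.modify p.2.1 [] (· ++ [p.1])) PySem.Dict.empty

-- `closest_before`: hand-written bisect_left loop in Source B = PySem.List.bisectLeft (same algorithm)
def pvClosestBefore (idx : PySem.Dict String (List Int)) (name : String) (pos : Int) : Option Int :=
  let xs := idx.getD name []
  let lo := PySem.List.bisectLeft xs pos
  if lo > 0 then some (xs.getD (lo - 1) 0) else none   -- lo-1 < xs.length here, getD is exact

-- Source B's `collect`, returning the produced segment; fuel is only a totality guard
def pvCollectB (idx : PySem.Dict String (List Int)) (sd : List (String × List String)) :
    Nat → String → Int → PySem.Set String → PySem.Set String × List (String × Int)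
  | 0, _, _, vis => (vis, [])
  | fuel + 1, name, pos, vis =>
    if PySem.Set.contains vis name then (vis, [])
    else
      let vis1 := PySem.Set.add vis name
      let st := (pvDeps sd name).foldl
        (fun (st : PySem.Set String × List (String × Int)) dep =>
          match pvClosestBefore idx dep pos with
          | none => st
          | some dp =>
            let r := pvCollectB idx sd fuel dep dp st.1
            (r.1, st.2 ++ r.2)) (vis1, [])
      (st.1, st.2 ++ [(name, pos)])

def collect_skill_and_dependencies_py_alt (skill_name : String) (skill_pos : Int) (order : List (String × Int)) (skill_dependencies : List (String × List String)) (required_floor : Int) : List (String × Int) :=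
  (pvCollectB (pvIndex order) skill_dependencies (pvFuel skill_dependencies) skill_name skill_pos
    PySem.Set.empty).2

-- ===== PRECONDITION & SPEC =====
-- Pre_ excludes exactly the inputs where A raises IndexError: skill_pos beyond len(order)
-- makes the backward scan start out of range, executed iff skill_name has dependencies.
def Pre_collect_skill_and_dependencies_py (skill_name : String) (skill_pos : Int) (order : List (String × Int)) (skill_dependencies : List (String × List String)) (required_floor : Int) : Prop :=
  skill_pos ≤ (order.length : Int) ∨ pvDeps skill_dependencies skill_name = []
instance (skill_name : String) (skill_pos : Int) (order : List (String × Int)) (skill_dependencies : List (String × List String)) (required_floor : Int) : Decidable (Pre_collect_skill_and_dependencies_py skill_name skill_pos order skill_dependencies required_floor) := by unfold Pre_collect_skill_and_dependencies_py; infer_instance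

def pvWitness_collect_skill_and_dependencies_py : String × Int × (List (String × Int)) × (List (String × List String)) × Int :=
  ("a", 1, [("b", 0), ("a", 1)], [("a", ["b"])], 0)

def Spec_collect_skill_and_dependencies_py (skill_name : String) (skill_pos : Int) (order : List (String × Int)) (skill_dependencies : List (String × List String)) (required_floor : Int) (out : List (String × Int)) : Prop := out = collect_skill_and_dependencies_py_alt skill_name skill_pos order skill_dependencies required_floor
instance (skill_name : String) (skill_pos : Int) (order : List (String × Int)) (skill_dependencies : List (String × List String)) (required_floor : Int) (out : List (String × Int)) : Decidable (Spec_collect_skill_and_dependencies_py skill_name skill_pos order skill_dependencies required_floor out) := by unfold Spec_collect_skill_and_dependencies_py; infer_instance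

-- ===== CLAIM (what is proved, stated in full; the proofs are below) =====
def Claim_equal_collect_skill_and_dependencies_py : Prop := ∀ (skill_name : String) (skill_pos : Int) (order : List (String × Int)) (skill_dependencies : List (String × List String)) (required_floor : Int), Dom_collect_skill_and_dependencies_py skill_name skill_pos order skill_dependencies required_floor → Pre_collect_skill_and_dependencies_py skill_name skill_pos order skill_dependencies required_floor → Spec_collect_skill_and_dependencies_py skill_name skill_pos order skill_dependencies required_floor (collect_skill_and_dependencies_py skill_name skill_pos order skill_dependencies required_floor)
-- ===== LEMMAS AND PROOFS =====

-- occurrence positions of `dep` in `order`, ascending (proof-side spec of both lookups)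
def pvOcc (order : List (String × Int)) (dep : String) : List Int :=
  ((PySem.List.enumerate order 0).filter (fun p => p.2.1 == dep)).map (·.1)

def pvNameAt (order : List (String × Int)) (k : Nat) : String := (order.getD k ("", 0)).1

-- the common contract: r is the closest occurrence of dep strictly before pos (none if there is none)
def pvIsLastOcc (order : List (String × Int)) (dep : String) (pos : Int) : Option Int → Prop
  | none => ∀ k : Nat, k < order.length → (k : Int) < pos → pvNameAt order k ≠ dep
  | some j => ∃ k : Nat, k < order.length ∧ j = (k : Int) ∧ (k : Int) < pos ∧ pvNameAt order k = dep ∧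
      ∀ m : Nat, m < order.length → (m : Int) < pos → k < m → pvNameAt order m ≠ dep

lemma pvIsLastOcc_unique (order : List (String × Int)) (dep : String) (pos : Int)
    (r r' : Option Int) (h : pvIsLastOcc order dep pos r) (h' : pvIsLastOcc order dep pos r') :
    r = r' := by
  match r, r' with
  | none, none => rfl
  | none, some j =>
    obtain ⟨k, hk, rfl, hlt, hname, _⟩ := h'
    exact absurd hname (h k hk hlt)
  | some j, none =>
    obtain ⟨k, hk, rfl, hlt, hname, _⟩ := h
    exact absurd hname (h' k hk hlt)
  | some j, some j' =>
    obtain ⟨k, hk, rfl, hlt, hname, hmax⟩ := h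
    obtain ⟨k', hk', rfl, hlt', hname', hmax'⟩ := h'
    rcases Nat.lt_trichotomy k k' with hc | hc | hc
    · exact absurd hname' (hmax k' hk' hlt' hc)
    · simp [hc]
    · exact absurd hname (hmax' k hk hlt hc)



lemma pvIndex_getD_aux (dep : String) :
    ∀ (l : List (String × Int)) (s : Int) (d : PySem.Dict String (List Int)),
    ((PySem.List.enumerate l s).foldl (fun d p => d.modify p.2.1 [] (· ++ [p.1])) d).getD dep []
      = d.getD dep [] ++ ((PySem.List.enumerate l s).filter (fun p => p.2.1 == dep)).map (·.1) := by
  intro l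
  induction l with
  | nil => simp [PySem.List.enumerate_nil]
  | cons x xs ih =>
    intro s d
    rw [PySem.List.enumerate_cons]
    simp only [List.foldl_cons, List.filter_cons]
    rw [ih]
    by_cases h : x.1 = dep
    · simp [h]
    · simp [h, PySem.Dict.getD_modify, Ne.symm h]

lemma pvIndex_getD (order : List (String × Int)) (dep : String) :
    (pvIndex order).getD dep [] = pvOcc order dep := by
  rw [pvIndex, pvOcc, pvIndex_getD_aux]
  simp [PySem.Dict.getD_empty]

lemma pvOcc_mem (order : List (String × Int)) (dep : String) (i : Int) :
    i ∈ pvOcc order dep ↔ ∃ k : Nat, k < order.length ∧ i = (k : Int) ∧ pvNameAt order k = dep := by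
  simp only [pvOcc, List.mem_map, List.mem_filter, PySem.List.mem_enumerate_iff]
  constructor
  · rintro ⟨⟨j, nm⟩, ⟨⟨k, hk, heq⟩, hbeq⟩, rfl⟩
    simp only [Prod.mk.injEq] at heq
    obtain ⟨h1, h2⟩ := heq
    refine ⟨k, hk, by omega, ?_⟩
    simp only [beq_iff_eq] at hbeq
    simp [pvNameAt, List.getD_eq_getElem?_getD, List.getElem?_eq_getElem hk, ← h2, hbeq]
  · rintro ⟨k, hk, rfl, hname⟩
    refine ⟨((k : Int), order[k]), ⟨⟨k, hk, by simp⟩, ?_⟩, rfl⟩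
    simp only [beq_iff_eq]
    simpa [pvNameAt, List.getD_eq_getElem?_getD, List.getElem?_eq_getElem hk] using hname

lemma pvOcc_sorted (order : List (String × Int)) (dep : String) :
    (pvOcc order dep).Pairwise (· < ·) := by
  exact ((PySem.List.pairwise_lt_enumerate order 0).filter _).map _ (fun _ _ h => h)

lemma pvNameAt_eq (order : List (String × Int)) (k : Nat) (h : k < order.length) :
    pvNameAt order k = (order[k]).1 := by
  simp [pvNameAt, List.getD_eq_getElem?_getD, List.getElem?_eq_getElem h]

lemma pvFindBack_isLastOcc (order : List (String × Int)) (dep : String) (n : Nat)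
    (hn : n < order.length) :
    pvIsLastOcc order dep ((n : Int) + 1) (pvFindBack order dep n) := by
  induction n with
  | zero =>
    have h0 : pvFindBack order dep 0
        = if (order[0]).1 = dep then some ((0:Nat) : Int) else none := by
      rw [pvFindBack, PySem.List.pyGet?_natCast, List.getElem?_eq_getElem hn]
      rfl
    by_cases h : (order[0]).1 = dep
    · rw [h0, if_pos h]
      simp only [pvIsLastOcc]
      exact ⟨0, hn, by simp, by simp, by rwa [pvNameAt_eq order 0 hn], fun m _ hm hm' => by omega⟩
    · rw [h0, if_neg h]
      simp only [pvIsLastOcc]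
      intro k hk hklt
      have : k = 0 := by omega
      subst this
      rw [pvNameAt_eq order 0 hn]; exact h
  | succ n ih =>
    have h0 : pvFindBack order dep (n+1)
        = if (order[n+1]).1 = dep then some ((n+1:Nat) : Int) else pvFindBack order dep n := by
      rw [pvFindBack, PySem.List.pyGet?_natCast, List.getElem?_eq_getElem hn]
      rfl
    by_cases h : (order[n+1]).1 = dep
    · rw [h0, if_pos h]
      simp only [pvIsLastOcc]
      refine ⟨n+1, hn, by simp, by push_cast; omega, by rwa [pvNameAt_eq order (n+1) hn], ?_⟩
      intro m _ hm hm'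
      have : (m:Int) < (n:Int) + 1 + 1 := by push_cast at hm ⊢; omega
      omega
    · rw [h0, if_neg h]
      have ih' := ih (by omega)
      match hfb : pvFindBack order dep n with
      | none =>
        rw [hfb] at ih'
        simp only [pvIsLastOcc] at ih' ⊢
        intro k hk hklt
        by_cases hkn : k = n + 1
        · subst hkn; rw [pvNameAt_eq order (n+1) hn]; exact h
        · exact ih' k hk (by push_cast at hklt ⊢; omega)
      | some j =>
        rw [hfb] at ih'
        simp only [pvIsLastOcc] at ih' ⊢
        obtain ⟨k, hk, rfl, hklt, hname, hmax⟩ := ih'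
        refine ⟨k, hk, rfl, by push_cast at hklt ⊢; omega, hname, ?_⟩
        intro m hm hmlt hkm
        by_cases hmn : m = n + 1
        · subst hmn; rw [pvNameAt_eq order (n+1) hn]; exact h
        · exact hmax m hm (by push_cast at hmlt ⊢; omega) hkm

lemma pvA_lookup_isLastOcc (order : List (String × Int)) (dep : String) (pos : Int)
    (hpos : pos ≤ (order.length : Int)) :
    pvIsLastOcc order dep pos
      (if pos ≤ 0 then none else pvFindBack order dep (pos - 1).toNat) := by
  by_cases h : pos ≤ 0
  · rw [if_pos h]
    intro k _ hk _; omega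
  · rw [if_neg h]
    have h1 : ((pos - 1).toNat : Int) = pos - 1 := by omega
    have h2 : (pos - 1).toNat < order.length := by omega
    have := pvFindBack_isLastOcc order dep (pos - 1).toNat h2
    rwa [show ((pos - 1).toNat : Int) + 1 = pos by omega] at this

lemma pvB_lookup_isLastOcc (order : List (String × Int)) (dep : String) (pos : Int) :
    pvIsLastOcc order dep pos (pvClosestBefore (pvIndex order) dep pos) := by
  have hxs := pvIndex_getD order dep
  set xs := pvOcc order dep with hxsdef
  have hsortedle : xs.Pairwise (· ≤ ·) :=
    (pvOcc_sorted order dep).imp (fun h => le_of_lt h)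
  obtain ⟨hlo_le, hbelow, habove⟩ := PySem.List.bisectLeft_spec xs pos hsortedle
  set lo := PySem.List.bisectLeft xs pos with hlodef
  rw [pvClosestBefore, hxs, ← hlodef]
  by_cases hpos0 : lo > 0
  · rw [if_pos hpos0]
    have hlt : lo - 1 < xs.length := by omega
    have hgetD : xs.getD (lo - 1) 0 = xs[lo - 1] := List.getD_eq_getElem xs 0 hlt
    rw [hgetD]
    have hmem : xs[lo - 1] ∈ xs := List.getElem_mem hlt
    obtain ⟨k, hk, heqk, hname⟩ := (pvOcc_mem order dep _).mp hmem
    simp only [pvIsLastOcc]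
    refine ⟨k, hk, heqk, ?_, hname, ?_⟩
    · rw [← heqk]; exact hbelow (lo - 1) hlt (by omega)
    · intro m hm hmlt hkm hmname
      have hmmem : ((m : Int)) ∈ xs := (pvOcc_mem order dep _).mpr ⟨m, hm, rfl, hmname⟩
      obtain ⟨j', hj', hxj'⟩ := List.mem_iff_getElem.mp hmmem
      have hj'lo : j' < lo := by
        by_contra hge
        have := habove j' hj' (by omega)
        omega
      rcases Nat.lt_or_ge j' (lo - 1) with hc | hc
      · have hsorted : xs.Pairwise (· < ·) := pvOcc_sorted order dep
        have hlt2 := (List.pairwise_iff_getElem.mp hsorted) j' (lo-1) hj' hlt hc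
        rw [hxj', heqk] at hlt2
        have : m < k := by exact_mod_cast hlt2
        omega
      · have hj'eq : j' = lo - 1 := by omega
        subst hj'eq
        have hkm' : ((k:Int)) = ((m:Int)) := heqk.symm.trans hxj'
        have : k = m := by exact_mod_cast hkm'
        omega
  · rw [if_neg hpos0]
    simp only [pvIsLastOcc]
    intro k hk hklt hkname
    have hkmem : ((k : Int)) ∈ xs := (pvOcc_mem order dep _).mpr ⟨k, hk, rfl, hkname⟩
    obtain ⟨j, hj, hxj⟩ := List.mem_iff_getElem.mp hkmem
    have := habove j hj (by omega)
    omega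

lemma pvLookup_eq (order : List (String × Int)) (dep : String) (pos : Int)
    (hpos : pos ≤ (order.length : Int)) :
    (if pos ≤ 0 then none else pvFindBack order dep (pos - 1).toNat)
      = pvClosestBefore (pvIndex order) dep pos :=
  pvIsLastOcc_unique order dep pos _ _ (pvA_lookup_isLastOcc order dep pos hpos)
    (pvB_lookup_isLastOcc order dep pos)

lemma pvLookup_some_facts (order : List (String × Int)) (dep : String) (pos dp : Int)
    (h : pvClosestBefore (pvIndex order) dep pos = some dp) :
    0 ≤ dp ∧ dp < pos ∧ dp < (order.length : Int) := by
  have := pvB_lookup_isLastOcc order dep pos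
  rw [h] at this
  simp only [pvIsLastOcc] at this
  obtain ⟨k, hk, rfl, hlt, -, -⟩ := this
  refine ⟨by positivity, hlt, by exact_mod_cast hk⟩

lemma pvMain (order : List (String × Int)) (sd : List (String × List String)) :
    ∀ (fuel : Nat) (name : String) (pos : Int) (vis : PySem.Set String)
      (acc : List (String × Int)), pos ≤ (order.length : Int) →
      pvCollectA order sd fuel name pos vis acc
        = ((pvCollectB (pvIndex order) sd fuel name pos vis).1,
           acc ++ (pvCollectB (pvIndex order) sd fuel name pos vis).2) := by
  intro fuel
  induction fuel with
  | zero => intro name pos vis acc _; simp [pvCollectA, pvCollectB]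
  | succ fuel ih =>
    intro name pos vis acc hpos
    rw [pvCollectA, pvCollectB]
    by_cases hv : PySem.Set.contains vis name
    · simp only [hv, if_true]
      simp
    · simp only [hv, if_neg, Bool.false_eq_true, not_false_eq_true]
      have hfold : ∀ (l : List String) (vis0 : PySem.Set String) (out0 : List (String × Int)),
          l.foldl (fun (st : PySem.Set String × List (String × Int)) dep =>
            let depPos : Option Int :=
              if pos ≤ 0 then none else pvFindBack order dep (pos - 1).toNat
            match depPos with
            | none => st
            | some dp =>
              if dp > pos then st
              else pvCollectA order sd fuel dep dp st.1 st.2) (vis0, acc ++ out0)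
          = ((l.foldl (fun (st : PySem.Set String × List (String × Int)) dep =>
              match pvClosestBefore (pvIndex order) dep pos with
              | none => st
              | some dp =>
                let r := pvCollectB (pvIndex order) sd fuel dep dp st.1
                (r.1, st.2 ++ r.2)) (vis0, out0)).1,
             acc ++ (l.foldl (fun (st : PySem.Set String × List (String × Int)) dep =>
              match pvClosestBefore (pvIndex order) dep pos with
              | none => st
              | some dp =>
                let r := pvCollectB (pvIndex order) sd fuel dep dp st.1
                (r.1, st.2 ++ r.2)) (vis0, out0)).2) := by
        intro l
        induction l with
        | nil => intro vis0 out0; simp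
        | cons dep l ihl =>
          intro vis0 out0
          simp only [List.foldl_cons]
          rw [pvLookup_eq order dep pos hpos]
          match hcb : pvClosestBefore (pvIndex order) dep pos with
          | none => exact ihl vis0 out0
          | some dp =>
            obtain ⟨hdp0, hdplt, hdplen⟩ := pvLookup_some_facts order dep pos dp hcb
            simp only
            rw [if_neg (by omega)]
            rw [ih dep dp vis0 (acc ++ out0) (by omega), List.append_assoc]
            exact ihl _ _
      have h2 := hfold (pvDeps sd name) (PySem.Set.add vis name) []
      rw [List.append_nil] at h2
      simp only [h2]
      simp [List.append_assoc]


-- ===== VERDICT (by name: the statement is the Claim_ definition above) =====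
theorem collect_skill_and_dependencies_py_spec : Claim_equal_collect_skill_and_dependencies_py := by
  intro skill_name skill_pos order sd rf _ hpre
  unfold Spec_collect_skill_and_dependencies_py
  rw [collect_skill_and_dependencies_py, collect_skill_and_dependencies_py_alt]
  by_cases hlen : skill_pos ≤ (order.length : Int)
  · rw [pvMain order sd (pvFuel sd) skill_name skill_pos PySem.Set.empty [] hlen]
    simp
  · have hdeps : pvDeps sd skill_name = [] := hpre.resolve_left hlen
    rw [pvFuel, pvCollectA, pvCollectB]
    simp [hdeps]
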